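-- pv_equiv track=rewrite | github.com/StarSein/BaekJoon | 백준/Gold/5569. 출근 경로/출근 경로.py | solution
-- ===== SOURCE A (Python) =====
-- def solution(W: int, H: int) -> int:
--     MOD = int(1e5)
--
--     US = 0  # Up Straight
--     RS = 1  # Right straight
--     UT = 2  # Up Turn
--     RT = 3  # Right Turn
--
--     dp = [[[0] * 4 for col in range(W)] for row in range(H)]
--     for r in range(H):
--         dp[r][0][US] = 1
--     for c in range(W):
--         dp[0][c][RS] = 1
--
--     for r in range(1, H):
--         for c in range(1, W):
--             dp[r][c][US] = (dp[r - 1][c][US] + dp[r - 1][c][UT]) % MOD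
--             dp[r][c][RS] = (dp[r][c - 1][RS] + dp[r][c - 1][RT]) % MOD
--             dp[r][c][UT] = dp[r - 1][c][RS]
--             dp[r][c][RT] = dp[r][c - 1][US]
--
--     return sum(dp[H - 1][W - 1]) % MOD
-- ===== SOURCE B (Python) =====
-- def solution(W: int, H: int) -> int:
--     # Two-state DP: V[c]/Hh[c] = paths ending at (r,c) whose last move is
--     # vertical / horizontal (= US+UT and RS+RT of the 4-state version), mod 1e5.
--     MOD = 100000
--     V = [1] + [0] * (W - 1)
--     Hh = [1] * W
--     for _ in range(1, H):
--         nV, nH = [1], [0]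
--         h = 0
--         for vPrev, vHere, hPrev in zip(V, V[1:], Hh):
--             nV.append((vHere + hPrev) % MOD)
--             h = (h + vPrev) % MOD
--             nH.append(h)
--         V, Hh = nV, nH
--     return (V[-1] + Hh[-1]) % MOD
-- ===== Notes on version B (the rewrite author's own statement) =====
-- stated objective: simpler
-- what changed: Replaces A's 4-state-per-cell DP over a full H x W x 4 table by a rolling 2-state DP (paths ending with a vertical vs a horizontal last move, a diagonal recurrence), keeping only two rows of length W.
-- outside the precondition, e.g. on solution(0, 3): A raises IndexError, B returns 1; on solution(3, 0): A raises IndexError, B returns 1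
import Mathlib
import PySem

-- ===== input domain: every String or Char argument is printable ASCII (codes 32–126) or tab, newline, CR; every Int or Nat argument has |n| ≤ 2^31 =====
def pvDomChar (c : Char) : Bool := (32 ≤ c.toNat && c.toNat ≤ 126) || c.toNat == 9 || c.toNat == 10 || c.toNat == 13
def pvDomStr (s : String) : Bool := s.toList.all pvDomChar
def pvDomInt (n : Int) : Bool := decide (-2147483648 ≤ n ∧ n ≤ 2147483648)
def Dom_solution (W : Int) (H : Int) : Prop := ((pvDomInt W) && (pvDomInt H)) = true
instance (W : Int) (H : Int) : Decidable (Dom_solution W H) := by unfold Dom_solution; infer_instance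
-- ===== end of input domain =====

-- B replaces A's 4-state-per-cell DP by a 2-state (vertical/horizontal last move) DP: simpler state, same values.

-- ===== PORT A =====
-- A cell of A's dp table: (US, RS, UT, RT).
def pvMOD : Int := 100000

-- the body of A's inner loop: new cell at (r,c) from prev-row cell p = dp[r-1][c]
-- and the just-written cell q = dp[r][c-1] (Python's in-place writes read exactly these).
def pvCellA (p q : Int × Int × Int × Int) : Int × Int × Int × Int :=
  ((p.1 + p.2.2.1) % pvMOD, (q.2.1 + q.2.2.2) % pvMOD, p.2.1, q.1)

-- 'for c in range(1, W)': scan along the row; consumes dp[r-1][1:], carries dp[r][c-1]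
def pvRowAuxA (ps : List (Int × Int × Int × Int)) (q : Int × Int × Int × Int) :
    List (Int × Int × Int × Int) :=
  match ps with
  | [] => []
  | p :: rest => let n := pvCellA p q; n :: pvRowAuxA rest n

-- one iteration of 'for r in range(1, H)'; col 0 is the pre-set dp[r][0] = (1,0,0,0)
def pvStepA (row : List (Int × Int × Int × Int)) : List (Int × Int × Int × Int) :=
  (1, 0, 0, 0) :: pvRowAuxA row.tail (1, 0, 0, 0)

-- row 0 after A's two init loops: dp[0][0] = (1,1,0,0), dp[0][c] = (0,1,0,0) for c ≥ 1
def pvRow0A (w : Nat) : List (Int × Int × Int × Int) :=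
  match w with
  | 0 => []
  | Nat.succ k => (1, 1, 0, 0) :: List.replicate k (0, 1, 0, 0)

def pvLoopA (n : Nat) (row : List (Int × Int × Int × Int)) : List (Int × Int × Int × Int) :=
  match n with
  | 0 => row
  | Nat.succ k => pvLoopA k (pvStepA row)

def solution (W : Int) (H : Int) : Int :=
  let last := (pvLoopA (H - 1).toNat (pvRow0A W.toNat)).getLastD (0, 0, 0, 0)
  (last.1 + last.2.1 + last.2.2.1 + last.2.2.2) % pvMOD

-- ===== PORT B =====
-- zip of three lists, as Python's zip
def pvZip3 {α β γ : Type} : List α → List β → List γ → List (α × β × γ)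
  | a :: as, b :: bs, c :: cs => (a, b, c) :: pvZip3 as bs cs
  | _, _, _ => []

-- inner loop of Source B: consumes zip(V, V[1:], Hh), carries h; returns (nV[1:], nH[1:])
def pvRowAuxB (ts : List (Int × Int × Int)) (h : Int) : List Int × List Int :=
  match ts with
  | [] => ([], [])
  | (vp, vh, hp) :: rest =>
      let h' := (h + vp) % pvMOD
      let (vs, hs) := pvRowAuxB rest h'
      ((vh + hp) % pvMOD :: vs, h' :: hs)

def pvStepB (V Hh : List Int) : List Int × List Int :=
  let r := pvRowAuxB (pvZip3 V V.tail Hh) 0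
  (1 :: r.1, 0 :: r.2)

def pvLoopB (n : Nat) (V Hh : List Int) : List Int × List Int :=
  match n with
  | 0 => (V, Hh)
  | Nat.succ k => pvLoopB k (pvStepB V Hh).1 (pvStepB V Hh).2

def solution_alt (W : Int) (H : Int) : Int :=
  let V0 : List Int := 1 :: List.replicate (W.toNat - 1) 0
  let H0 : List Int := List.replicate W.toNat 1
  let r := pvLoopB (H - 1).toNat V0 H0
  (r.1.getLastD 0 + r.2.getLastD 0) % pvMOD

-- ===== PRECONDITION & SPEC =====
-- Pre_ excludes exactly W ≤ 0 or H ≤ 0, where the Python A raises IndexError (empty dp rows/table).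
def Pre_solution (W : Int) (H : Int) : Prop := 1 ≤ W ∧ 1 ≤ H
instance (W : Int) (H : Int) : Decidable (Pre_solution W H) := by unfold Pre_solution; infer_instance
def pvWitness_solution : Int × Int := (3, 4)

def Spec_solution (W : Int) (H : Int) (out : Int) : Prop := out = solution_alt W H
instance (W : Int) (H : Int) (out : Int) : Decidable (Spec_solution W H out) := by unfold Spec_solution; infer_instance

-- ===== CLAIM (what is proved, stated in full; the proofs are below) =====
def Claim_equal_solution : Prop := ∀ (W : Int) (H : Int), Dom_solution W H → Pre_solution W H → Spec_solution W H (solution W H)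

-- ===== LEMMAS AND PROOFS =====

-- B's two states, read off a 4-state cell
def pvV (c : Int × Int × Int × Int) : Int := (c.1 + c.2.2.1) % pvMOD
def pvH (c : Int × Int × Int × Int) : Int := (c.2.1 + c.2.2.2) % pvMOD

-- consistency of A's rows: each cell's RS is the previous cell's (RS+RT)%MOD
def pvR (p p' : Int × Int × Int × Int) : Prop := p'.2.1 = pvH p

theorem pvRowAuxA_chain (ps : List (Int × Int × Int × Int)) (q : Int × Int × Int × Int) :
    List.IsChain pvR (q :: pvRowAuxA ps q) := by
  induction ps generalizing q with
  | nil => simp [pvRowAuxA]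
  | cons p rest ih =>
      simp only [pvRowAuxA]
      exact List.isChain_cons_cons.mpr ⟨by simp [pvCellA, pvR, pvH], ih _⟩

theorem pvRow0A_chain (w : Nat) : List.IsChain pvR (pvRow0A w) := by
  cases w with
  | zero => simp [pvRow0A]
  | succ k =>
      simp only [pvRow0A]
      induction k with
      | zero => exact List.isChain_singleton _
      | succ m ih =>
          rw [List.replicate_succ]
          refine List.isChain_cons_cons.mpr ⟨by simp [pvR, pvH, pvMOD], ?_⟩
          clear ih
          induction m with
          | zero => exact List.isChain_singleton _
          | succ n ih2 =>
              rw [List.replicate_succ]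
              exact List.isChain_cons_cons.mpr ⟨by simp [pvR, pvH, pvMOD], ih2⟩

theorem pvInner_eq (rest : List (Int × Int × Int × Int)) (pPrev q : Int × Int × Int × Int)
    (hc : List.IsChain pvR (pPrev :: rest)) (hq : q.1 = pvV pPrev) :
    pvRowAuxB (pvZip3 (List.map pvV (pPrev :: rest)) (List.map pvV rest) (List.map pvH (pPrev :: rest))) (pvH q)
      = (List.map pvV (pvRowAuxA rest q), List.map pvH (pvRowAuxA rest q)) := by
  induction rest generalizing pPrev q with
  | nil => simp [pvZip3, pvRowAuxB, pvRowAuxA]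
  | cons p rest' ih =>
      have hpp : p.2.1 = pvH pPrev := (List.isChain_cons_cons.mp hc).1
      have hc' : List.IsChain pvR (p :: rest') := (List.isChain_cons_cons.mp hc).2
      simp only [List.map_cons, pvZip3, pvRowAuxB, pvRowAuxA]
      have ihres := ih p (pvCellA p q) hc' (by simp [pvCellA, pvV])
      simp only [List.map_cons] at ihres
      rw [show (pvH q + pvV pPrev) % pvMOD = pvH (pvCellA p q) by
            simp [pvCellA, pvH, pvV, hq]]
      rw [ihres]
      simp [pvCellA, pvV, pvH, hpp]

-- vA of the first cell of every relevant row is 1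
def pvGood (row : List (Int × Int × Int × Int)) : Prop :=
  List.IsChain pvR row ∧ (∀ p ∈ row.head?, pvV p = 1)

theorem pvStepB_eq (row : List (Int × Int × Int × Int)) (hg : pvGood row) :
    pvStepB (List.map pvV row) (List.map pvH row)
      = (List.map pvV (pvStepA row), List.map pvH (pvStepA row)) := by
  cases row with
  | nil => simp [pvStepB, pvStepA, pvZip3, pvRowAuxB, pvRowAuxA, pvV, pvH, pvMOD]
  | cons p rest =>
      have hq : ((1 : Int), (0 : Int), (0 : Int), (0 : Int)).1 = pvV p := by
        have := hg.2 p (by simp)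
        simp [this]
      have h0 : pvH ((1 : Int), (0 : Int), (0 : Int), (0 : Int)) = 0 := by
        simp [pvH, pvMOD]
      have := pvInner_eq rest p ((1 : Int), (0 : Int), (0 : Int), (0 : Int)) hg.1 hq
      rw [h0] at this
      simp only [pvStepB, pvStepA, List.map_cons, List.tail_cons] at *
      rw [this]
      simp [pvV, pvH, pvMOD]

theorem pvStepA_good (row : List (Int × Int × Int × Int)) : pvGood (pvStepA row) := by
  constructor
  · exact pvRowAuxA_chain row.tail _
  · intro p hp
    simp only [pvStepA, List.head?_cons, Option.mem_some_iff] at hp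
    subst hp; simp [pvV, pvMOD]

theorem pvRow0A_good (w : Nat) : pvGood (pvRow0A w) := by
  refine ⟨pvRow0A_chain w, ?_⟩
  cases w with
  | zero => simp [pvRow0A]
  | succ k =>
      intro p hp
      simp only [pvRow0A, List.head?_cons, Option.mem_some_iff] at hp
      subst hp; simp [pvV, pvMOD]

theorem pvLoop_eq (n : Nat) (row : List (Int × Int × Int × Int)) (hg : pvGood row) :
    pvLoopB n (List.map pvV row) (List.map pvH row)
      = (List.map pvV (pvLoopA n row), List.map pvH (pvLoopA n row)) := by
  induction n generalizing row with
  | zero => simp [pvLoopB, pvLoopA]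
  | succ k ih =>
      simp only [pvLoopB, pvLoopA, pvStepB_eq row hg]
      exact ih (pvStepA row) (pvStepA_good row)

theorem pvMapV_row0 (k : Nat) :
    List.map pvV (pvRow0A (Nat.succ k)) = 1 :: List.replicate k 0 := by
  simp [pvRow0A, pvV, pvMOD, List.map_replicate]

theorem pvMapH_row0 (k : Nat) :
    List.map pvH (pvRow0A (Nat.succ k)) = List.replicate (Nat.succ k) 1 := by
  simp [pvRow0A, pvH, pvMOD, List.map_replicate, List.replicate_succ]

theorem pvLoopA_ne_nil (n : Nat) (row : List (Int × Int × Int × Int)) (h : row ≠ []) :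
    pvLoopA n row ≠ [] := by
  induction n generalizing row with
  | zero => simpa [pvLoopA]
  | succ k ih => exact ih (pvStepA row) (by simp [pvStepA])

theorem pvGetLastD_map_aux {α β : Type} (f : α → β) (l : List α) (a : α) :
    (List.map f l).getLastD (f a) = f (l.getLastD a) := by
  induction l generalizing a with
  | nil => simp
  | cons b t ih => simp only [List.map_cons, List.getLastD_cons]; exact ih b

theorem pvGetLastD_map {α β : Type} (f : α → β) (l : List α) (h : l ≠ []) (d : β) (d' : α) :
    (List.map f l).getLastD d = f (l.getLastD d') := by
  rcases List.exists_cons_of_ne_nil h with ⟨a, t, rfl⟩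
  simp only [List.map_cons, List.getLastD_cons]
  exact pvGetLastD_map_aux f t a

-- ===== VERDICT (by name: the statement is the Claim_ definition above) =====
theorem solution_spec : Claim_equal_solution := by
  intro W H _ hpre
  unfold Spec_solution solution solution_alt
  obtain ⟨hW, hH⟩ := hpre
  obtain ⟨k, hk⟩ : ∃ k, W.toNat = Nat.succ k := ⟨W.toNat - 1, by omega⟩
  have hrow : pvRow0A W.toNat ≠ [] := by rw [hk]; simp [pvRow0A]
  have hne := pvLoopA_ne_nil (H - 1).toNat _ hrow
  rw [hk] at hne
  have hloop := pvLoop_eq (H - 1).toNat (pvRow0A W.toNat) (pvRow0A_good _)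
  rw [hk, pvMapV_row0, pvMapH_row0] at hloop
  simp only [hk, Nat.succ_sub_one, hloop]
  rw [pvGetLastD_map pvV _ hne ((0 : Int)) ((0 : Int), (0 : Int), (0 : Int), (0 : Int)),
      pvGetLastD_map pvH _ hne ((0 : Int)) ((0 : Int), (0 : Int), (0 : Int), (0 : Int))]
  set c := (pvLoopA (H - 1).toNat (pvRow0A (Nat.succ k))).getLastD ((0 : Int), (0 : Int), (0 : Int), (0 : Int))
  show (c.1 + c.2.1 + c.2.2.1 + c.2.2.2) % pvMOD = (pvV c + pvH c) % pvMOD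
  simp only [pvV, pvH]
  conv_rhs => rw [Int.add_emod_emod, Int.emod_add_emod]
  ring_nf
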